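-- pv_equiv track=rewrite | github.com/sergiorgiraldo/AdventOfCode2020 | solutions/day09/solution.py | find_contiguous_set
-- ===== SOURCE A (Python) =====
-- def find_contiguous_set(input, number, size):
--     for i in range(0, len(input) - size + 1):
--         terms = []
--
--         for j in range(i, i + size):
--             terms.append(input[j])
--
--         if sum(terms) == number:
--             return terms
--
--     return []
-- ===== SOURCE B (Python) =====
-- def find_contiguous_set(input, number, size):
--     n = len(input)
--     if size <= 0 or size > n:
--         return []
--     s = sum(input[:size])
--     if s == number:
--         return input[:size]
--     for i in range(1, n - size + 1):
--         s += input[i + size - 1] - input[i - 1]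
--         if s == number:
--             return input[i:i + size]
--     return []
-- ===== Notes on version B (the rewrite author's own statement) =====
-- stated objective: faster
-- what changed: Replaces the rebuild-and-resum of every window with a sliding-window running sum updated in O(1) per step, materialising a window only on a match.
import Mathlib
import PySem

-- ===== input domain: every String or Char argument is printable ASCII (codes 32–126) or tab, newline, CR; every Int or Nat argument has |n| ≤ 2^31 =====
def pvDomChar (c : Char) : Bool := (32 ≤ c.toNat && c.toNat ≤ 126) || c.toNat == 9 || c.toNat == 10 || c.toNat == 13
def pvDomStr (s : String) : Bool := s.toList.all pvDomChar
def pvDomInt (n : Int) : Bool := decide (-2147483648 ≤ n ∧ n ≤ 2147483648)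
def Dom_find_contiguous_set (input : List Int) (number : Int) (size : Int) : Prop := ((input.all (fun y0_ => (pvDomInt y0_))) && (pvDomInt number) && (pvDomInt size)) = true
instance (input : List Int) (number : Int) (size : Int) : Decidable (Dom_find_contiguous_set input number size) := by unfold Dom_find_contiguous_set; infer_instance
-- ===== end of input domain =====

-- B changes the algorithm: a sliding-window running sum updated in O(1) per step instead of
-- rebuilding and re-summing every window; equal return value on all inputs (A is total).

-- ===== PORT A =====
-- inner loop 'for j in range(i, i+size): terms.append(input[j])'; input[j] is always in
-- range when this loop body runs, so pyGetD with default 0 is exact here.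
def pvATerms (input : List Int) (i size : Int) : List Int :=
  (PySem.List.pyRange i (i + size) 1).map (fun j => PySem.List.pyGetD input j 0)

-- outer loop 'for i in range(0, len(input)-size+1)' with early return
def pvAGo (input : List Int) (number size : Int) : List Int → List Int
  | [] => []
  | i :: rest =>
      let terms := pvATerms input i size
      if terms.sum = number then terms else pvAGo input number size rest

def find_contiguous_set (input : List Int) (number : Int) (size : Int) : List Int :=
  pvAGo input number size (PySem.List.pyRange 0 ((input.length : Int) - size + 1) 1)

-- ===== PORT B =====
-- 'for i in range(1, n-size+1)' carrying the running sum s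
def pvBGo (input : List Int) (number size : Int) : Int → List Int → List Int
  | _, [] => []
  | s, i :: rest =>
      let s' := s + PySem.List.pyGetD input (i + size - 1) 0 - PySem.List.pyGetD input (i - 1) 0
      if s' = number then PySem.List.slice input (some i) (some (i + size))
      else pvBGo input number size s' rest

def find_contiguous_set_alt (input : List Int) (number : Int) (size : Int) : List Int :=
  let n : Int := (input.length : Int)
  if size ≤ 0 ∨ n < size then []
  else
    let w := PySem.List.slice input none (some size)
    let s := w.sum
    if s = number then w
    else pvBGo input number size s (PySem.List.pyRange 1 (n - size + 1) 1)

-- ===== PRECONDITION & SPEC =====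
def Spec_find_contiguous_set (input : List Int) (number : Int) (size : Int) (out : List Int) : Prop := out = find_contiguous_set_alt input number size
instance (input : List Int) (number : Int) (size : Int) (out : List Int) : Decidable (Spec_find_contiguous_set input number size out) := by unfold Spec_find_contiguous_set; infer_instance

-- ===== CLAIM (what is proved, stated in full; the proofs are below) =====
def Claim_equal_find_contiguous_set : Prop := ∀ (input : List Int) (number : Int) (size : Int), Dom_find_contiguous_set input number size → Spec_find_contiguous_set input number size (find_contiguous_set input number size)

-- ===== LEMMAS AND PROOFS =====

-- the window of length sz starting at a, as the map A's inner loop produces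
def pvW (input : List Int) (sz a : Nat) : List Int :=
  (List.range sz).map (fun k => input.getD (a + k) 0)

theorem pvAGo_nonpos (input : List Int) (number size : Int) (hsz : size ≤ 0)
    (hnum : number ≠ 0) (l : List Int) : pvAGo input number size l = [] := by
  induction l with
  | nil => rfl
  | cons i rest ih =>
      have hr : PySem.List.pyRange i (i + size) 1 = [] :=
        PySem.List.pyRange_one_eq_nil (by omega)
      simp [pvAGo, pvATerms, hr, hnum.symm, ih]

theorem pvAGo_nonpos_zero (input : List Int) (size : Int) (hsz : size ≤ 0)
    (l : List Int) : pvAGo input 0 size l = [] := by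
  cases l with
  | nil => rfl
  | cons i rest =>
      have hr : PySem.List.pyRange i (i + size) 1 = [] :=
        PySem.List.pyRange_one_eq_nil (by omega)
      simp [pvAGo, pvATerms, hr]

theorem pvTerms_eq_W (input : List Int) (sz a : Nat) (ha : a + sz ≤ input.length) :
    pvATerms input (a : Int) (sz : Int) = pvW input sz a := by
  unfold pvATerms pvW
  rw [PySem.List.pyRange_one]
  have h1 : (((a : Int) + (sz : Int)) - (a : Int)).toNat = sz := by omega
  rw [h1, List.map_map]
  apply List.map_congr_left
  intro k hk
  simp only [Function.comp]
  have : (a : Int) + (k : Int) = ((a + k : Nat) : Int) := by push_cast; ring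
  rw [this, PySem.List.pyGetD_natCast]

theorem pvW_eq_dropTake (input : List Int) (sz a : Nat) (ha : a + sz ≤ input.length) :
    pvW input sz a = (input.drop a).take sz := by
  apply List.ext_getElem
  · simp [pvW]; omega
  · intro i h1 h2
    simp only [pvW]
    have hi : i < sz := by simpa [pvW] using h1
    have hiN : a + i < input.length := by omega
    simp [List.getElem_map, List.getElem_range, List.getElem_take, List.getElem_drop,
      List.getD_eq_getElem?_getD, List.getElem?_eq_getElem hiN]

-- sliding-sum shift: adding the new right element and removing the old left one
theorem pvSum_shift_aux (g : Nat → Int) (m a : Nat) :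
    ((List.range m).map (fun k => g (a + 1 + k))).sum
      = ((List.range m).map (fun k => g (a + k))).sum + g (a + m) - g a := by
  induction m with
  | zero => simp
  | succ m ih =>
      rw [List.range_succ]
      simp only [List.map_append, List.sum_append, List.map, List.sum_cons, List.sum_nil]
      rw [ih]
      have h1 : a + 1 + m = a + (m + 1) := by omega
      rw [h1]; ring

theorem pvW_shift (input : List Int) (sz a : Nat) :
    (pvW input sz (a + 1)).sum
      = (pvW input sz a).sum + input.getD (a + sz) 0 - input.getD a 0 := by
  simpa [pvW] using pvSum_shift_aux (fun x => input.getD x 0) sz a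

theorem pvSlice_eq_W (input : List Int) (sz a : Nat) (ha : a + sz ≤ input.length) :
    PySem.List.slice input (some (a : Int)) (some ((a : Int) + (sz : Int))) = pvW input sz a := by
  rw [PySem.List.slice_natCast_add, pvW_eq_dropTake input sz a ha]

-- the bridge: from position a ≥ 1 on, A's scan with window rebuilding equals
-- B's scan carrying the running sum of the previous window
theorem pvBridge (input : List Int) (number : Int) (sz : Nat) (hsz : 1 ≤ sz)
    (hszN : sz ≤ input.length) :
    ∀ (fuel a : Nat), 1 ≤ a →
      ((input.length : Int) - (sz : Int) + 1) - (a : Int) ≤ (fuel : Int) →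
      pvAGo input number (sz : Int)
          (PySem.List.pyRange (a : Int) ((input.length : Int) - (sz : Int) + 1) 1)
        = pvBGo input number (sz : Int) ((pvW input sz (a - 1)).sum)
            (PySem.List.pyRange (a : Int) ((input.length : Int) - (sz : Int) + 1) 1) := by
  intro fuel
  induction fuel with
  | zero =>
      intro a _ hle
      have h : PySem.List.pyRange (a : Int) ((input.length : Int) - (sz : Int) + 1) 1 = [] :=
        PySem.List.pyRange_one_eq_nil (by omega)
      rw [h]; rfl
  | succ fuel ih =>
      intro a ha hle
      by_cases hlt : (a : Int) < (input.length : Int) - (sz : Int) + 1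
      · rw [PySem.List.pyRange_one_cons hlt]
        have haN : a + sz ≤ input.length := by omega
        have hterms : pvATerms input (a : Int) (sz : Int) = pvW input sz a :=
          pvTerms_eq_W input sz a haN
        have hcast1 : (a : Int) + (sz : Int) - 1 = ((a - 1 + sz : Nat) : Int) := by omega
        have hcast2 : (a : Int) - 1 = ((a - 1 : Nat) : Int) := by omega
        have hs' : (pvW input sz (a - 1)).sum
              + PySem.List.pyGetD input ((a : Int) + (sz : Int) - 1) 0
              - PySem.List.pyGetD input ((a : Int) - 1) 0 = (pvW input sz a).sum := by
          rw [hcast1, hcast2, PySem.List.pyGetD_natCast, PySem.List.pyGetD_natCast]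
          have := pvW_shift input sz (a - 1)
          have hadd : a - 1 + 1 = a := by omega
          rw [hadd] at this
          rw [this]
        by_cases hmatch : (pvW input sz a).sum = number
        · simp only [pvAGo, pvBGo, hterms, hs', hmatch, if_pos]
          exact (pvSlice_eq_W input sz a haN).symm
        · simp only [pvAGo, pvBGo, hterms, hs', if_neg hmatch]
          have hnext : (a + 1 : Nat) - 1 = a := by omega
          have hcast3 : (a : Int) + 1 = ((a + 1 : Nat) : Int) := by push_cast; ring
          rw [hcast3]
          have := ih (a + 1) (by omega) (by omega)
          rw [hnext] at this
          exact this
      · have h : PySem.List.pyRange (a : Int) ((input.length : Int) - (sz : Int) + 1) 1 = [] :=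
          PySem.List.pyRange_one_eq_nil (by omega)
        rw [h]; rfl

theorem pvMain (input : List Int) (number : Int) (size : Int) :
    find_contiguous_set input number size = find_contiguous_set_alt input number size := by
  unfold find_contiguous_set find_contiguous_set_alt
  by_cases hdeg : size ≤ 0 ∨ (input.length : Int) < size
  · rw [if_pos hdeg]
    rcases hdeg with hsz | hbig
    · by_cases hnum : number = 0
      · subst hnum; exact pvAGo_nonpos_zero input size hsz _
      · exact pvAGo_nonpos input number size hsz hnum _
    · have h : PySem.List.pyRange 0 ((input.length : Int) - size + 1) 1 = [] :=
        PySem.List.pyRange_one_eq_nil (by omega)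
      rw [h]; rfl
  · rw [if_neg hdeg]
    push_neg at hdeg
    obtain ⟨hpos, hle⟩ := hdeg
    obtain ⟨sz, rfl⟩ : ∃ sz : Nat, size = (sz : Int) := ⟨size.toNat, by omega⟩
    have hsz1 : 1 ≤ sz := by omega
    have hszN : sz ≤ input.length := by omega
    have hM : (0 : Int) < (input.length : Int) - (sz : Int) + 1 := by omega
    rw [PySem.List.pyRange_one_cons hM]
    have hW0 : pvATerms input 0 (sz : Int) = pvW input sz 0 := by
      have := pvTerms_eq_W input sz 0 (by omega)
      simpa using this
    have hslice0 : PySem.List.slice input none (some (sz : Int)) = pvW input sz 0 := by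
      rw [PySem.List.slice_to_natCast, pvW_eq_dropTake input sz 0 (by omega), List.drop_zero]
    by_cases hmatch : (pvW input sz 0).sum = number
    · simp [pvAGo, hW0, hslice0, hmatch]
    · simp only [pvAGo, hW0, hslice0, if_neg hmatch]
      have h01 : (0 : Int) + 1 = ((1 : Nat) : Int) := by norm_num
      rw [h01]
      have := pvBridge input number sz hsz1 hszN (input.length) 1 (by omega) (by omega)
      simpa using this

-- ===== VERDICT (by name: the statement is the Claim_ definition above) =====
theorem find_contiguous_set_spec : Claim_equal_find_contiguous_set := by
  intro input number size _
  unfold Spec_find_contiguous_set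
  exact pvMain input number size
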